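-- pv_equiv track=rewrite | github.com/yeqiu2010/fire_safety_sft | rag/build_vectordb.py | _split_by_separators
-- ===== SOURCE A (Python) =====
-- from typing import List, Dict, Tuple, Optional
--
-- def _split_by_separators(text: str, separators: List[str]) -> List[str]:
--     """递归按分隔符切分"""
--     for sep in separators:
--         if sep in text:
--             parts = text.split(sep)
--             result = []
--             for i, part in enumerate(parts):
--                 if i < len(parts) - 1:
--                     result.append(part + sep)
--                 else:
--                     result.append(part)
--             return [p for p in result if p.strip()]
--     return [text]
-- ===== SOURCE B (Python) =====
-- from typing import List
--
-- def _split_by_separators(text: str, separators: List[str]) -> List[str]: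
--     """按第一个匹配的分隔符切分（保留分隔符），单遍扫描切片"""
--     for sep in separators:
--         if sep in text:
--             pieces = []
--             start = 0
--             idx = text.find(sep, start)
--             while idx != -1:
--                 end = idx + len(sep)
--                 pieces.append(text[start:end])
--                 start = end
--                 idx = text.find(sep, start)
--             pieces.append(text[start:])
--             return [p for p in pieces if p.strip()]
--     return [text]
-- ===== Notes on version B (the rewrite author's own statement) =====
-- stated objective: alternative
-- what changed: B replaces A's split-then-reattach (text.split(sep) plus an enumerate loop re-appending the separator to every non-final part) with a single find-driven scan that emits separator-terminated slices text[start:idx+len(sep)] directly; the final strip-filter and the [text] fallback are kept. Pre_ excludes only the inputs where A raises ValueError: since '' is contained in every string, A raises exactly when the first separator contained in text is the empty string.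
import Mathlib
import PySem

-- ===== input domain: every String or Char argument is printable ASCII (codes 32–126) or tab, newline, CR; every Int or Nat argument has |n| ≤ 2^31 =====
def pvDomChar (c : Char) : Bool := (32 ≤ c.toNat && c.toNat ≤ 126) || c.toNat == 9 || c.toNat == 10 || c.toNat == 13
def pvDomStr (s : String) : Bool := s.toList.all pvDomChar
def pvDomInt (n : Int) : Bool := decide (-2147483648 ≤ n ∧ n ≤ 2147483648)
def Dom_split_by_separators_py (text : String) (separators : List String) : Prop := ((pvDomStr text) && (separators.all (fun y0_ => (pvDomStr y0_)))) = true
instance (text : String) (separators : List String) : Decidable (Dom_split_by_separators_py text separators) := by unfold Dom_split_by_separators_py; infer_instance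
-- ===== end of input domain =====

-- B replaces A's split-then-reattach loop with a single find-driven scan that emits
-- separator-terminated slices directly (objective: alternative decomposition, same cost).

-- ===== PORT A =====
-- loop 'for sep in separators' of A; each iteration: 'if sep in text' then split/reattach/filter
def pvLoopA (text : String) : List String → List String
  | [] => [text]
  | sep :: rest =>
    if PySem.Str.isIn sep text then
      match PySem.Str.split? text sep with
      | some parts =>
          let result : List String :=
            (PySem.List.enumerate parts).foldl
              (fun acc ip =>
                if ip.1 < (parts.length : Int) - 1 then acc ++ [ip.2 ++ sep] else acc ++ [ip.2]) []
          result.filter (fun p => !(PySem.Str.strip p == ""))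
      | none => []  -- Python raises ValueError here (sep = ""); these inputs are outside Pre_
    else pvLoopA text rest

def split_by_separators_py (text : String) (separators : List String) : List String :=
  pvLoopA text separators

-- ===== PORT B =====
-- B's while-loop: idx = text.find(sep, start); emit text[start:idx+len(sep)]; finally text[start:].
-- fuel (= len(text)+1) only makes the loop total; it is never exhausted for a nonempty sep.
def pvFindPieces (text sep : String) : Nat → Int → List String
  | 0, _ => []
  | fuel+1, start =>
      let idx := PySem.Str.findFrom text sep start
      if idx = -1 then [PySem.Str.slice text (some start) none]
      else PySem.Str.slice text (some start) (some (idx + PySem.Str.len sep)) ::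
           pvFindPieces text sep fuel (idx + PySem.Str.len sep)

def pvLoopB (text : String) : List String → List String
  | [] => [text]
  | sep :: rest =>
    if PySem.Str.isIn sep text then
      (pvFindPieces text sep (text.toList.length + 1) 0).filter (fun p => !(PySem.Str.strip p == ""))
    else pvLoopB text rest

def split_by_separators_py_alt (text : String) (separators : List String) : List String :=
  pvLoopB text separators

-- ===== PRECONDITION & SPEC =====
-- Pre_ excludes exactly the inputs where A raises ValueError: since '' is "in" every string,
-- A raises iff the first separator contained in text is the empty string.
def Pre_split_by_separators_py (text : String) (separators : List String) : Prop :=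
  separators.find? (fun s => PySem.Str.isIn s text) ≠ some ""
instance (text : String) (separators : List String) : Decidable (Pre_split_by_separators_py text separators) := by unfold Pre_split_by_separators_py; infer_instance

def pvWitness_split_by_separators_py : String × List String := ("ab, cd,ef", [",", " "])

def Spec_split_by_separators_py (text : String) (separators : List String) (out : List String) : Prop := out = split_by_separators_py_alt text separators
instance (text : String) (separators : List String) (out : List String) : Decidable (Spec_split_by_separators_py text separators out) := by unfold Spec_split_by_separators_py; infer_instance

-- ===== CLAIM (what is proved, stated in full; the proofs are below) =====
def Claim_equal_split_by_separators_py : Prop := ∀ (text : String) (separators : List String), Dom_split_by_separators_py text separators → Pre_split_by_separators_py text separators → Spec_split_by_separators_py text separators (split_by_separators_py text separators)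

-- ===== LEMMAS AND PROOFS =====

lemma pv_infix_iff (S l : List Char) : S <:+: l ↔ ∃ j, S <+: l.drop j := by
  rw [← PySem.Chars.isIn_iff_infix, ← PySem.Chars.exists_prefix_drop_iff_isIn]

lemma pv_find_eq (l S : List Char) (i : Nat) (h1 : S <+: l.drop i)
    (h2 : ∀ j < i, ¬ S <+: l.drop j) : PySem.Chars.find l S = (i : Int) := by
  have hin : S <:+: l := (pv_infix_iff S l).2 ⟨i, h1⟩
  have h0 : 0 ≤ PySem.Chars.find l S := (PySem.Chars.find_nonneg_iff l S).2 hin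
  obtain ⟨hp, hmin⟩ := PySem.Chars.find_spec h0
  have hk : (PySem.Chars.find l S).toNat = i := by
    rcases lt_trichotomy (PySem.Chars.find l S).toNat i with h | h | h
    · exact absurd hp (h2 _ h)
    · exact h
    · exact absurd h1 (hmin _ h)
  omega

lemma pv_go_main (S : List Char) (hS : S ≠ []) :
    ∀ fuel l cur acc, l.length < fuel →
      PySem.Chars.splitOn.go S fuel l cur acc =
        acc.reverse ++
          (if S <:+: l then
            (cur.reverse ++ l.take (PySem.Chars.find l S).toNat) ::
              PySem.Chars.splitOn (l.drop ((PySem.Chars.find l S).toNat + S.length)) S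
          else [cur.reverse ++ l]) := by
  intro fuel
  induction fuel using Nat.strong_induction_on with
  | _ fuel IH =>
    intro l cur acc hlen
    match fuel, l with
    | f+1, [] =>
      have : ¬ S <:+: ([] : List Char) := by
        intro h; exact hS (List.eq_nil_of_infix_nil h)
      rw [PySem.Chars.splitOn.go.eq_def]
      simp [this]
    | f+1, c :: rest =>
      rw [PySem.Chars.splitOn.go.eq_def]
      simp only []
      by_cases hpre : S.isPrefixOf (c :: rest) = true
      · rw [if_pos hpre]
        have hpre' : S <+: (c :: rest) := List.isPrefixOf_iff_prefix.mp hpre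
        have hinf : S <:+: (c :: rest) := hpre'.isInfix
        have hfind : PySem.Chars.find (c :: rest) S = (0 : Int) := by
          have := pv_find_eq (c :: rest) S 0 (by simpa using hpre') (by omega)
          simpa using this
        have hS1 : 0 < S.length := List.length_pos_of_ne_nil hS
        have hdlen : (List.drop S.length (c :: rest)).length < f := by
          simp only [List.length_cons] at hlen
          simp only [List.length_drop, List.length_cons]
          omega
        have hsplit : PySem.Chars.splitOn (List.drop S.length (c :: rest)) S =
            (if S <:+: List.drop S.length (c :: rest) then
              (List.take (PySem.Chars.find (List.drop S.length (c :: rest)) S).toNat (List.drop S.length (c :: rest))) ::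
                PySem.Chars.splitOn ((List.drop S.length (c :: rest)).drop
                  ((PySem.Chars.find (List.drop S.length (c :: rest)) S).toNat + S.length)) S
            else [List.drop S.length (c :: rest)]) := by
          rw [PySem.Chars.splitOn]
          rw [IH ((List.drop S.length (c :: rest)).length + 1) (by omega) _ [] [] (by omega)]
          simp
        rw [if_pos hinf, hfind]
        rw [IH f (by omega) _ [] (cur.reverse :: acc) hdlen]
        simp only [Int.toNat_zero, List.take_zero, List.append_nil, Nat.zero_add]
        rw [hsplit]
        split_ifs with h2 <;> simp
      · rw [if_neg hpre]
        have hnp : ¬ S <+: (c :: rest) := fun h => hpre (List.isPrefixOf_iff_prefix.mpr h)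
        rw [IH f (by omega) rest (c :: cur) acc (by simp at hlen ⊢; omega)]
        by_cases hir : S <:+: rest
        · have hinf : S <:+: (c :: rest) := hir.trans (List.suffix_cons c rest).isInfix
          have h0r : 0 ≤ PySem.Chars.find rest S := (PySem.Chars.find_nonneg_iff rest S).2 hir
          obtain ⟨hpr, hminr⟩ := PySem.Chars.find_spec h0r
          set ir := (PySem.Chars.find rest S).toNat with hir_def
          have hfind : PySem.Chars.find (c :: rest) S = ((ir + 1 : Nat) : Int) := by
            apply pv_find_eq
            · simpa using hpr
            · intro j hj
              match j with
              | 0 => simpa using hnp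
              | j+1 => exact fun h => hminr j (by omega) (by simpa using h)
          rw [if_pos hir, if_pos hinf, hfind]
          have hd : List.drop (ir + 1 + S.length) (c :: rest) = List.drop (ir + S.length) rest := by
            have h3 : ir + 1 + S.length = (ir + S.length) + 1 := by omega
            rw [h3, List.drop_succ_cons]
          simp [List.take_succ_cons, List.reverse_cons, List.append_assoc, hd]
        · have hninf : ¬ S <:+: (c :: rest) := by
            intro h
            rcases (pv_infix_iff S _).1 h with ⟨j, hj⟩
            match j with
            | 0 => exact hnp (by simpa using hj)
            | j+1 => exact hir ((pv_infix_iff S rest).2 ⟨j, by simpa using hj⟩)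
          rw [if_neg hir, if_neg hninf]
          simp

lemma pv_splitOn_step (S l : List Char) (hS : S ≠ []) :
    PySem.Chars.splitOn l S =
      if S <:+: l then
        l.take (PySem.Chars.find l S).toNat ::
          PySem.Chars.splitOn (l.drop ((PySem.Chars.find l S).toNat + S.length)) S
      else [l] := by
  rw [PySem.Chars.splitOn, pv_go_main S hS (l.length + 1) l [] [] (by omega)]
  simp

lemma pv_splitOn_ne_nil (S l : List Char) (hS : S ≠ []) : PySem.Chars.splitOn l S ≠ [] := by
  rw [pv_splitOn_step S l hS]; split <;> simp

def pvPieces (S : List Char) : Nat → List Char → List (List Char)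
  | 0, l => [l]
  | f+1, l =>
      if PySem.Chars.isIn S l then
        (l.take (PySem.Chars.find l S).toNat ++ S) ::
          pvPieces S f (l.drop ((PySem.Chars.find l S).toNat + S.length))
      else [l]

def pvReattach (S : List Char) : List (List Char) → List (List Char)
  | [] => []
  | [p] => [p]
  | p :: q :: ps => (p ++ S) :: pvReattach S (q :: ps)

lemma pv_reattach_cons (S : List Char) (p : List Char) (ps : List (List Char)) (h : ps ≠ []) :
    pvReattach S (p :: ps) = (p ++ S) :: pvReattach S ps := by
  cases ps with
  | nil => exact absurd rfl h
  | cons q ps => rfl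

lemma pv_drop_lt (S l : List Char) (hS : S ≠ []) (hinf : S <:+: l) (i : Nat) :
    (l.drop (i + S.length)).length < l.length := by
  have hS1 : 0 < S.length := List.length_pos_of_ne_nil hS
  have hl1 : 0 < l.length := by
    cases l with
    | nil => exact absurd (List.eq_nil_of_infix_nil hinf) hS
    | cons a t => simp
  simp only [List.length_drop]; omega

lemma pv_reattach_splitOn (S : List Char) (hS : S ≠ []) :
    ∀ f l, l.length < f → pvReattach S (PySem.Chars.splitOn l S) = pvPieces S f l := by
  intro f
  induction f with
  | zero => intro l h; omega
  | succ f IH =>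
    intro l hlen
    rw [pv_splitOn_step S l hS, pvPieces]
    by_cases hinf : S <:+: l
    · rw [if_pos hinf, if_pos ((PySem.Chars.isIn_iff_infix S l).2 hinf)]
      rw [pv_reattach_cons S _ _ (pv_splitOn_ne_nil S _ hS)]
      have hlt := pv_drop_lt S l hS hinf (PySem.Chars.find l S).toNat
      rw [IH _ (by omega)]
    · rw [if_neg hinf, if_neg (by simpa using (PySem.Chars.isIn_eq_false_iff S l).2 hinf)]
      rfl

def pvReattachS (sep : String) : List String → List String
  | [] => []
  | [p] => [p]
  | p :: q :: ps => (p ++ sep) :: pvReattachS sep (q :: ps)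

lemma pv_enumFold (sep : String) :
    ∀ (tail : List String) (k : Int) (acc : List String) (n : Int), k + tail.length = n →
      (PySem.List.enumerate tail k).foldl
        (fun acc ip => if ip.1 < n - 1 then acc ++ [ip.2 ++ sep] else acc ++ [ip.2]) acc
      = acc ++ pvReattachS sep tail := by
  intro tail
  induction tail with
  | nil => intro k acc n h; simp [PySem.List.enumerate, pvReattachS]
  | cons p rest IH =>
    intro k acc n h
    rw [PySem.List.enumerate]
    simp only [List.foldl_cons]
    cases rest with
    | nil =>
      have : ¬ (k < n - 1) := by simp at h; omega
      rw [if_neg this]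
      simp [PySem.List.enumerate, pvReattachS]
    | cons q ps =>
      have : k < n - 1 := by simp at h; omega
      rw [if_pos this]
      rw [IH (k+1) _ n (by simp at h ⊢; omega)]
      simp [pvReattachS]

lemma pv_reattachS_map (sep : String) :
    ∀ cs : List (List Char),
      pvReattachS sep (cs.map String.ofList) = (pvReattach sep.toList cs).map String.ofList := by
  intro cs
  induction cs with
  | nil => rfl
  | cons p ps IH =>
    cases ps with
    | nil => rfl
    | cons q qs =>
      simp only [List.map_cons] at IH ⊢
      rw [pvReattachS, pvReattach]
      simp only [List.map_cons, ← IH]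
      congr 1
      rw [String.ofList_append, String.ofList_toList]

lemma pv_findPieces (text sep : String) (hS : sep.toList ≠ []) :
    ∀ f k, k ≤ text.toList.length → text.toList.length - k < f →
      pvFindPieces text sep f (k : Int) =
        (pvPieces sep.toList f (text.toList.drop k)).map String.ofList := by
  intro f
  induction f with
  | zero => intro k hk hf; omega
  | succ f IH =>
    intro k hk hf
    set L := text.toList with hL
    set S := sep.toList with hSdef
    rw [pvFindPieces]
    have hFF : PySem.Str.findFrom text sep (k : Int) =
        (if PySem.Chars.find (L.drop k) S = -1 then -1
         else (k : Int) + PySem.Chars.find (L.drop k) S) := by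
      rw [PySem.Str.findFrom_eq, PySem.Chars.findFrom_natCast _ _ k hk]
    by_cases hfind : PySem.Chars.find (L.drop k) S = -1
    · have hninf : ¬ S <:+: L.drop k := (PySem.Chars.find_eq_neg_one_iff _ _).1 hfind
      rw [hFF, if_pos hfind]
      simp only [if_true]
      have hb : PySem.Chars.isIn S (L.drop k) = false :=
        (PySem.Chars.isIn_eq_false_iff S (L.drop k)).2 hninf
      rw [pvPieces, hb]
      simp only [Bool.false_eq_true, if_false, List.map_cons, List.map_nil]
      congr 1
      apply String.toList_inj.mp
      rw [PySem.Str.toList_slice, PySem.Chars.slice_eq_listSlice, PySem.List.slice_from_natCast,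
        String.toList_ofList]
    · have h0 : 0 ≤ PySem.Chars.find (L.drop k) S := by
        have := PySem.Chars.neg_one_le_find (L.drop k) S; omega
      have hinf : S <:+: L.drop k := by
        rw [← PySem.Chars.find_nonneg_iff]; exact h0
      obtain ⟨hp, -⟩ := PySem.Chars.find_spec h0
      set i := (PySem.Chars.find (L.drop k) S).toNat with hidef
      have hiv : PySem.Chars.find (L.drop k) S = (i : Int) := by omega
      have hplen : S.length ≤ ((L.drop k).drop i).length := hp.length_le
      have hS1 : 0 < S.length := List.length_pos_of_ne_nil hS
      have hk' : k + i + S.length ≤ L.length := by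
        simp only [List.length_drop] at hplen; omega
      have hne : ¬ ((k : Int) + PySem.Chars.find (L.drop k) S = -1) := by omega
      rw [hFF, if_neg hfind]
      simp only [if_neg hne]
      have hlen : PySem.Str.len sep = (S.length : Int) := rfl
      have hidx : (k : Int) + PySem.Chars.find (L.drop k) S + PySem.Str.len sep
          = ((k + (i + S.length) : Nat) : Int) := by
        rw [hlen, hiv]; push_cast; ring
      have htake : (L.drop k).take (i + S.length) = (L.drop k).take i ++ S := by
        rw [List.take_add]
        congr 1
        exact ((List.prefix_iff_eq_take).mp hp).symm
      have hhead : PySem.Str.slice text (some (k : Int))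
          (some ((k : Int) + PySem.Chars.find (L.drop k) S + PySem.Str.len sep))
          = String.ofList ((L.drop k).take i ++ S) := by
        apply String.toList_inj.mp
        rw [PySem.Str.toList_slice, PySem.Chars.slice_eq_listSlice, String.toList_ofList]
        rw [hidx]
        have : ((k + (i + S.length) : Nat) : Int) = ((k : Nat) : Int) + ((i + S.length : Nat) : Int) := by push_cast; ring
        rw [this, PySem.List.slice_natCast_add, htake]
      rw [hhead, hidx, IH (k + (i + S.length)) (by omega) (by omega)]
      rw [pvPieces, if_pos (by simpa using (PySem.Chars.isIn_iff_infix S (L.drop k)).2 hinf)]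
      simp only [List.map_cons, ← hidef]
      rw [List.drop_drop]

lemma pv_split_some (text sep : String) (hS : sep.toList ≠ []) :
    PySem.Str.split? text sep =
      some ((PySem.Chars.splitOn text.toList sep.toList).map String.ofList) := by
  have : sep.toList.isEmpty = false := by simpa [List.isEmpty_iff] using hS
  simp [PySem.Str.split?, PySem.Chars.split?, this]

lemma pv_loops (text : String) :
    ∀ seps : List String, (seps.find? (fun s => PySem.Str.isIn s text) ≠ some "") →
      pvLoopA text seps = pvLoopB text seps := by
  intro seps
  induction seps with
  | nil => intro _; rfl
  | cons sep rest IH =>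
    intro hpre
    rw [pvLoopA, pvLoopB]
    by_cases hin : PySem.Str.isIn sep text = true
    · rw [if_pos hin, if_pos hin]
      have hne : sep ≠ "" := by
        intro h
        apply hpre
        simp [h]
      have hS : sep.toList ≠ [] := by
        intro h
        exact hne (String.toList_inj.mp (by simp [h]))
      rw [pv_split_some text sep hS]
      set L := text.toList with hL
      set S := sep.toList with hSd
      set parts := (PySem.Chars.splitOn L S).map String.ofList with hparts
      show List.filter (fun p => !(PySem.Str.strip p == ""))
            ((PySem.List.enumerate parts).foldl
              (fun acc ip => if ip.1 < (parts.length : Int) - 1 then acc ++ [ip.2 ++ sep] else acc ++ [ip.2]) [])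
        = List.filter (fun p => !(PySem.Str.strip p == "")) (pvFindPieces text sep (L.length + 1) 0)
      congr 1
      rw [pv_enumFold sep parts 0 [] (parts.length : Int) (by omega)]
      rw [List.nil_append, hparts, pv_reattachS_map sep]
      rw [pv_reattach_splitOn S hS (L.length + 1) L (by omega)]
      have h0 : ((0 : Nat) : Int) = (0 : Int) := rfl
      rw [← h0, pv_findPieces text sep hS (L.length + 1) 0 (by omega) (by rw [hL]; omega)]
      rw [List.drop_zero]
    · rw [if_neg hin, if_neg hin]
      apply IH
      intro h
      apply hpre
      rw [List.find?_cons_of_neg (by simpa using hin)]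
      exact h

-- ===== VERDICT (by name: the statement is the Claim_ definition above) =====
theorem split_by_separators_py_spec : Claim_equal_split_by_separators_py := by
  intro text seps _hdom hpre
  unfold Pre_split_by_separators_py at hpre
  unfold Spec_split_by_separators_py split_by_separators_py split_by_separators_py_alt
  exact pv_loops text seps hpre
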